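-- pv_equiv track=rewrite | github.com/damiankantorowski/AIN | lab07/lab07.py | naive_pareto_front
-- ===== SOURCE A (Python) =====
-- def naive_pareto_front(evaluations):
--     pareto_fronts = []
--     new_evaluations = evaluations.copy()
--
--     while len(evaluations) != 0:
--         pareto_front = []
--         for i in range(len(evaluations)):
--             dominated = False
--             for j in range(len(evaluations)):
--                 if (
--                     i == j or
--                     evaluations[i][0] < evaluations[j][0] or
--                     evaluations[i][1] > evaluations[j][1] or
--                     (evaluations[i][0] == evaluations[j][0] and evaluations[i][1] == evaluations[j][1])
--                 ):
--                     continue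
--                 else:
--                     dominated = True
--                     break
--             if not dominated:
--                 pareto_front.append(evaluations[i])
--                 new_evaluations.remove(evaluations[i])
--
--         pareto_fronts.append(pareto_front)
--         evaluations = new_evaluations.copy()
--
--     return pareto_fronts
-- ===== SOURCE B (Python) =====
-- def naive_pareto_front(evaluations):
--     fronts = []
--     remaining = list(evaluations)
--     while remaining:
--         non_dominated = set()
--         best_y = None
--         for p in sorted(set(remaining), key=lambda q: (q[0], -q[1])):
--             if best_y is None or best_y < p[1]:
--                 non_dominated.add(p)
--                 best_y = p[1]
--         fronts.append([p for p in remaining if p in non_dominated])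
--         remaining = [p for p in remaining if p not in non_dominated]
--     return fronts
-- ===== Notes on version B (the rewrite author's own statement) =====
-- stated objective: faster
-- what changed: Each peeling round now sorts the distinct points by (x, -y) and finds the non-dominated set with a single running-max-of-y scan, replacing A's all-pairs dominance test and its repeated list.remove calls.
import Mathlib
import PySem

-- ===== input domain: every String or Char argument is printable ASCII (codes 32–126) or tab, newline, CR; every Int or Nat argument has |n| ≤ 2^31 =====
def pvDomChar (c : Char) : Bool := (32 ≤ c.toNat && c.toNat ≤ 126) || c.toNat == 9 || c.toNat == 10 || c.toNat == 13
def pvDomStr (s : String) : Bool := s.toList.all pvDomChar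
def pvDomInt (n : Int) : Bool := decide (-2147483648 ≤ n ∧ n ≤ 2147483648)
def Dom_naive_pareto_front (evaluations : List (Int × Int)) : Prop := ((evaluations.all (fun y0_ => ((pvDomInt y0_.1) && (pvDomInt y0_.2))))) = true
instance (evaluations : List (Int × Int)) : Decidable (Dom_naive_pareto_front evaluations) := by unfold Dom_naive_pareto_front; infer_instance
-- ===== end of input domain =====

-- B replaces A's all-pairs dominance test in each peeling round by a sort of the
-- distinct points by (x, -y) plus one running-max-of-y scan (objective: faster).
-- Both functions only read their argument, so return-value equivalence is full equivalence.

-- ===== PORT A =====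
-- inner 'for j in range(len(evaluations))' loop computing the 'dominated' flag (break = return true)
def pvAinner (evals : List (Int × Int)) (i : Nat) : List Nat → Bool
  | [] => false
  | j :: js =>
    let ei := evals.getD i (0, 0)   -- i, j always in range: plain getD is exact here
    let ej := evals.getD j (0, 0)
    if i = j ∨ ei.1 < ej.1 ∨ ei.2 > ej.2 ∨ (ei.1 = ej.1 ∧ ei.2 = ej.2) then
      pvAinner evals i js
    else
      true

-- outer 'for i in range(len(evaluations))' loop threading (pareto_front, new_evaluations)
def pvAouter (evals : List (Int × Int)) :
    List Nat → List (Int × Int) × List (Int × Int) → List (Int × Int) × List (Int × Int)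
  | [], st => st
  | i :: is, (front, newE) =>
    if pvAinner evals i (List.range evals.length) then
      pvAouter evals is (front, newE)
    else
      let x := evals.getD i (0, 0)
      -- list.remove: the element is always present here, so the ValueError branch is unreachable
      pvAouter evals is (front ++ [x], (PySem.List.remove? newE x).getD newE)

-- the 'while len(evaluations) != 0' loop; fuel only makes it total (len+1 is proved sufficient below)
def pvAloop : Nat → List (Int × Int) → List (List (Int × Int)) → List (List (Int × Int))
  | 0, _, fronts => fronts
  | fuel + 1, evals, fronts =>
    if evals.length ≠ 0 then
      match pvAouter evals (List.range evals.length) ([], evals) with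
      | (front, newE) => pvAloop fuel newE (fronts ++ [front])
    else fronts

def naive_pareto_front (evaluations : List (Int × Int)) : List (List (Int × Int)) :=
  pvAloop (evaluations.length + 1) evaluations []

-- ===== PORT B =====
-- the 'for p in sorted(set(remaining), key=...)' scan with running max best_y
def pvBscan : List (Int × Int) → Option Int → PySem.Set (Int × Int) → PySem.Set (Int × Int)
  | [], _, nd => nd
  | p :: ps, best, nd =>
    match best with
    | none => pvBscan ps (some p.2) (PySem.Set.add nd p)
    | some b =>
      if b < p.2 then pvBscan ps (some p.2) (PySem.Set.add nd p)
      else pvBscan ps (some b) nd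

-- the 'while remaining:' loop; fuel only makes it total (len+1 is proved sufficient below)
def pvBloop : Nat → List (Int × Int) → List (List (Int × Int)) → List (List (Int × Int))
  | 0, _, fronts => fronts
  | fuel + 1, remaining, fronts =>
    if remaining.isEmpty then fronts
    else
      let keys := PySem.List.sorted2 (PySem.Set.ofList remaining) (fun q => q.1) (fun q => -q.2)
      let nd := pvBscan keys none PySem.Set.empty
      let front := remaining.filter (fun p => PySem.Set.contains nd p)
      pvBloop fuel (remaining.filter (fun p => !PySem.Set.contains nd p)) (fronts ++ [front])

def naive_pareto_front_alt (evaluations : List (Int × Int)) : List (List (Int × Int)) :=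
  pvBloop (evaluations.length + 1) evaluations []

-- ===== PRECONDITION & SPEC =====
def Spec_naive_pareto_front (evaluations : List (Int × Int)) (out : List (List (Int × Int))) : Prop := out = naive_pareto_front_alt evaluations
instance (evaluations : List (Int × Int)) (out : List (List (Int × Int))) : Decidable (Spec_naive_pareto_front evaluations out) := by unfold Spec_naive_pareto_front; infer_instance

-- ===== CLAIM (what is proved, stated in full; the proofs are below) =====
def Claim_equal_naive_pareto_front : Prop := ∀ (evaluations : List (Int × Int)), Dom_naive_pareto_front evaluations → Spec_naive_pareto_front evaluations (naive_pareto_front evaluations)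

-- ===== LEMMAS AND PROOFS =====

-- q dominates p: q is no worse in both objectives (minimize .1, maximize .2) and differs
abbrev Pdom (q p : Int × Int) : Prop := q.1 ≤ p.1 ∧ p.2 ≤ q.2 ∧ q ≠ p

def domB (L : List (Int × Int)) (p : Int × Int) : Bool := L.any (fun q => decide (Pdom q p))

theorem domB_iff (L : List (Int × Int)) (p : Int × Int) :
    domB L p = true ↔ ∃ q ∈ L, Pdom q p := by
  simp [domB]

-- a lexicographically (x asc, y desc) minimal element exists in a nonempty list
theorem exists_lexmin (L : List (Int × Int)) (h : L ≠ []) :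
    ∃ m ∈ L, ∀ q ∈ L, m.1 < q.1 ∨ (m.1 = q.1 ∧ q.2 ≤ m.2) := by
  induction L with
  | nil => simp at h
  | cons a t ih =>
    rcases eq_or_ne t [] with rfl | ht
    · exact ⟨a, by simp, by intro q hq; simp at hq; subst hq; omega⟩
    · obtain ⟨m, hm, hmin⟩ := ih ht
      by_cases hc : a.1 < m.1 ∨ (a.1 = m.1 ∧ m.2 ≤ a.2)
      · refine ⟨a, List.mem_cons_self, ?_⟩
        intro q hq
        rcases List.mem_cons.mp hq with rfl | hq
        · omega
        · have := hmin q hq; omega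
      · refine ⟨m, List.mem_cons_of_mem _ hm, ?_⟩
        intro q hq
        rcases List.mem_cons.mp hq with rfl | hq
        · omega
        · exact hmin q hq

theorem exists_nondom (L : List (Int × Int)) (h : L ≠ []) :
    ∃ m ∈ L, ¬ (domB L m = true) := by
  obtain ⟨m, hm, hmin⟩ := exists_lexmin L h
  refine ⟨m, hm, ?_⟩
  rw [domB_iff]
  rintro ⟨q, hq, h1, h2, h3⟩
  have := hmin q hq
  exact h3 (Prod.ext (by omega) (by omega))

theorem filter_dom_lt (L : List (Int × Int)) (h : L ≠ []) :
    (L.filter (fun p => domB L p)).length < L.length := by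
  obtain ⟨m, hm, hnd⟩ := exists_nondom L h
  exact List.length_filter_lt_length_iff_exists.mpr ⟨m, hm, by simpa using hnd⟩

-- the reference peeling: front of non-dominated points, recurse on the dominated rest
def ref (L : List (Int × Int)) : List (List (Int × Int)) :=
  if h : L = [] then []
  else (L.filter (fun p => !domB L p)) :: ref (L.filter (fun p => domB L p))
termination_by L.length
decreasing_by simpa using filter_dom_lt L h

-- A's inner loop is an existential over the index list
theorem pvAinner_ex (L : List (Int × Int)) (i : Nat) (js : List Nat) :
    pvAinner L i js = true ↔ ∃ j ∈ js,
      ¬(i = j ∨ (L.getD i (0,0)).1 < (L.getD j (0,0)).1 ∨ (L.getD i (0,0)).2 > (L.getD j (0,0)).2 ∨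
        ((L.getD i (0,0)).1 = (L.getD j (0,0)).1 ∧ (L.getD i (0,0)).2 = (L.getD j (0,0)).2)) := by
  induction js with
  | nil => simp [pvAinner]
  | cons j js ih =>
    by_cases hc : i = j ∨ (L.getD i (0,0)).1 < (L.getD j (0,0)).1 ∨ (L.getD i (0,0)).2 > (L.getD j (0,0)).2 ∨
        ((L.getD i (0,0)).1 = (L.getD j (0,0)).1 ∧ (L.getD i (0,0)).2 = (L.getD j (0,0)).2)
    · simp only [pvAinner, if_pos hc, ih, List.mem_cons]
      constructor
      · rintro ⟨j', hj', hne⟩; exact ⟨j', Or.inr hj', hne⟩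
      · rintro ⟨j', hj' | hj', hne⟩
        · subst hj'; exact absurd hc hne
        · exact ⟨j', hj', hne⟩
    · simp only [pvAinner, if_neg hc]
      exact ⟨fun _ => ⟨j, List.mem_cons_self, hc⟩, fun _ => trivial⟩

-- A's 'dominated' flag for index i is domination of L[i] by some element of L
theorem pvAinner_eq_domB (L : List (Int × Int)) (i : Nat) (hi : i < L.length) :
    pvAinner L i (List.range L.length) = domB L (L.getD i (0,0)) := by
  rw [Bool.eq_iff_iff, pvAinner_ex, domB_iff]
  constructor
  · rintro ⟨j, hj, hne⟩
    rw [List.mem_range] at hj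
    push_neg at hne
    obtain ⟨hij, h1, h2, h3⟩ := hne
    refine ⟨L.getD j (0,0), ?_, ?_, ?_, ?_⟩
    · rw [List.getD_eq_getElem _ _ hj]; exact List.getElem_mem hj
    · omega
    · omega
    · intro he
      have e1 : (L.getD j (0,0)).1 = (L.getD i (0,0)).1 := by rw [he]
      have e2 : (L.getD j (0,0)).2 = (L.getD i (0,0)).2 := by rw [he]
      omega
  · rintro ⟨q, hq, h1, h2, h3⟩
    obtain ⟨j, hj, hje⟩ := List.mem_iff_getElem.mp hq
    refine ⟨j, List.mem_range.mpr hj, ?_⟩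
    rw [List.getD_eq_getElem _ _ hj, hje]
    push_neg
    have hij : i ≠ j := by
      intro he; subst he
      rw [List.getD_eq_getElem _ _ hj] at h3; exact h3 hje.symm
    refine ⟨hij, by omega, by omega, ?_⟩
    intro e1 e2
    exact h3 (Prod.ext (by omega) (by omega))

-- the outer loop peels one front and leaves the dominated elements, in order
theorem pvAouter_spec (L : List (Int × Int)) :
    ∀ (suf pre front : List (Int × Int)), L = pre ++ suf →
    pvAouter L (List.range' pre.length suf.length) (front, pre.filter (fun p => domB L p) ++ suf)
      = (front ++ suf.filter (fun p => !domB L p), L.filter (fun p => domB L p)) := by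
  intro suf
  induction suf with
  | nil =>
    intro pre front hL
    simp [pvAouter, hL]
  | cons a suf' ih =>
    intro pre front hL
    have hi : pre.length < L.length := by rw [hL]; simp
    have hgd : L.getD pre.length (0,0) = a := by
      rw [List.getD_eq_getElem _ _ hi]
      subst hL
      rw [List.getElem_append_right (Nat.le_refl _)]
      simp
    have hpre1 : pre.length + 1 = (pre ++ [a]).length := by simp
    have hL' : L = (pre ++ [a]) ++ suf' := by rw [hL]; simp
    rw [List.length_cons, List.range'_succ, pvAouter, pvAinner_eq_domB L _ hi, hgd]
    by_cases hd : domB L a = true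
    · rw [if_pos hd]
      have : pre.filter (fun p => domB L p) ++ a :: suf'
           = (pre ++ [a]).filter (fun p => domB L p) ++ suf' := by
        simp [List.filter_append, hd]
      rw [this, hpre1, ih (pre ++ [a]) front hL']
      simp [hd]
    · rw [if_neg hd]
      dsimp only
      have hnotmem : a ∉ pre.filter (fun p => domB L p) := by
        intro hmem
        exact hd (List.of_mem_filter hmem)
      have hmem : a ∈ pre.filter (fun p => domB L p) ++ a :: suf' := by simp
      have hrem : PySem.List.remove? (pre.filter (fun p => domB L p) ++ a :: suf') a
          = some (pre.filter (fun p => domB L p) ++ suf') := by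
        rw [PySem.List.remove?_eq_some_erase _ _ hmem, List.erase_append_right _ hnotmem,
          List.erase_cons_head]
      rw [hrem]
      have : pre.filter (fun p => domB L p) ++ suf'
           = (pre ++ [a]).filter (fun p => domB L p) ++ suf' := by
        simp [List.filter_append, hd]
      simp only [Option.getD_some, this]
      rw [hpre1, ih (pre ++ [a]) (front ++ [a]) hL']
      simp [hd]

theorem pvAround (L : List (Int × Int)) :
    pvAouter L (List.range L.length) ([], L)
      = (L.filter (fun p => !domB L p), L.filter (fun p => domB L p)) := by
  have := pvAouter_spec L L [] [] rfl
  simpa [List.range_eq_range'] using this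

theorem pvAloop_eq_ref (fuel : Nat) : ∀ (L : List (Int × Int)) (fronts : List (List (Int × Int))),
    L.length < fuel → pvAloop fuel L fronts = fronts ++ ref L := by
  induction fuel with
  | zero => intro L fronts h; omega
  | succ fuel ih =>
    intro L fronts h
    rcases eq_or_ne L [] with rfl | hL
    · rw [pvAloop, ref]; simp
    · have hlen : L.length ≠ 0 := by simpa using hL
      have hrec := ih (L.filter (fun p => domB L p)) (fronts ++ [L.filter (fun p => !domB L p)])
        (by have := filter_dom_lt L hL; omega)
      rw [pvAloop, if_pos hlen, pvAround]
      dsimp only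
      rw [hrec]
      conv_rhs => rw [ref]
      rw [dif_neg hL]
      simp

-- strict (x ascending, y descending) order: the order of B's sort on distinct points
def lexlt (a b : Int × Int) : Prop := a.1 < b.1 ∨ (a.1 = b.1 ∧ b.2 < a.2)

-- B's tuple-key sort is the sort under the lexicographic order on (x, -y)
theorem sorted2_eq_sorted (xs : List (Int × Int)) :
    PySem.List.sorted2 xs (fun q => q.1) (fun q => -q.2)
      = PySem.List.sorted xs (fun q => toLex (q.1, -q.2)) := by
  unfold PySem.List.sorted2 PySem.List.sorted
  dsimp only
  have hb : (fun (a b : Int × Int) => decide (a.1 < b.1) || (!decide (b.1 < a.1) && decide (-a.2 < -b.2)))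
      = fun (a b : Int × Int) => decide (toLex (a.1, -a.2) < toLex (b.1, -b.2)) := by
    funext a b
    rw [Bool.eq_iff_iff]
    simp only [Bool.or_eq_true, Bool.and_eq_true, Bool.not_eq_true', decide_eq_true_eq,
      decide_eq_false_iff_not, Prod.Lex.lt_iff, ofLex_toLex]
    omega
  rw [hb]
  simp

theorem mem_keys (L : List (Int × Int)) (p : Int × Int) :
    p ∈ PySem.List.sorted2 (PySem.Set.ofList L) (fun q => q.1) (fun q => -q.2) ↔ p ∈ L := by
  rw [sorted2_eq_sorted]
  rw [(PySem.List.sorted_perm _ _ _).mem_iff]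
  exact PySem.Set.mem_ofList L p

theorem keys_pairwise (L : List (Int × Int)) :
    (PySem.List.sorted2 (PySem.Set.ofList L) (fun q => q.1) (fun q => -q.2)).Pairwise lexlt := by
  rw [sorted2_eq_sorted]
  have h1 := PySem.List.sorted_pairwise (PySem.Set.ofList L) (fun q => toLex (q.1, -q.2))
  have h2 : (PySem.List.sorted (PySem.Set.ofList L) (fun q => toLex (q.1, -q.2))).Nodup :=
    ((PySem.List.sorted_perm _ _ _).nodup_iff).mpr (PySem.Set.nodup_ofList L)
  refine (h1.and h2).imp ?_
  rintro a b ⟨hle, hne⟩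
  rw [Prod.Lex.le_iff] at hle
  simp only [ofLex_toLex] at hle
  unfold lexlt
  rcases hle with h | ⟨h1', h2'⟩
  · left; exact h
  · by_cases hy : a.2 = b.2
    · exact absurd (Prod.ext h1' hy) hne
    · right; exact ⟨h1', by omega⟩

-- the running-max scan collects exactly the non-dominated points among the keys
theorem pvBscan_mem (L : List (Int × Int)) :
    ∀ (ks procd : List (Int × Int)) (best : Option Int) (nd : PySem.Set (Int × Int)),
    (∀ q ∈ procd, q ∈ L) →
    (∀ p ∈ ks, p ∈ L) →
    (procd ++ ks).Pairwise lexlt →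
    (∀ y : Int, (∃ q ∈ procd, y ≤ q.2) ↔ ∃ b, best = some b ∧ y ≤ b) →
    (∀ p ∈ ks, ∀ q ∈ L, Pdom q p → q ∈ procd ∨ q ∈ ks) →
    ∀ x, (x ∈ pvBscan ks best nd ↔ x ∈ nd ∨ (x ∈ ks ∧ ¬ domB L x = true)) := by
  intro ks
  induction ks with
  | nil => intro procd best nd _ _ _ _ _ x; simp [pvBscan]
  | cons p ks' ih =>
    intro procd best nd hprocdL hksL hpw hbest hcover x
    have hpL : p ∈ L := hksL p List.mem_cons_self
    obtain ⟨hpw1, hpw2, hcross⟩ := List.pairwise_append.mp hpw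
    -- the head is dominated iff some processed point has y at least its y
    have hdomchar : domB L p = true ↔ ∃ q ∈ procd, p.2 ≤ q.2 := by
      rw [domB_iff]
      constructor
      · rintro ⟨q, hqL, hq1, hq2, hq3⟩
        rcases hcover p List.mem_cons_self q hqL ⟨hq1, hq2, hq3⟩ with hq | hq
        · exact ⟨q, hq, hq2⟩
        · rcases List.mem_cons.mp hq with rfl | hq
          · exact absurd rfl hq3
          · have := (List.pairwise_cons.mp hpw2).1 q hq
            unfold lexlt at this
            exact absurd (Prod.ext (by omega) (by omega)) hq3
      · rintro ⟨q, hq, hy⟩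
        have hlt := hcross q hq p List.mem_cons_self
        unfold lexlt at hlt
        refine ⟨q, hprocdL q hq, by omega, hy, ?_⟩
        intro he
        subst he
        omega
    -- hypotheses for the tail with procd ++ [p]
    have hprocdL' : ∀ q ∈ procd ++ [p], q ∈ L := by
      intro q hq
      rcases List.mem_append.mp hq with hq | hq
      · exact hprocdL q hq
      · simp at hq; subst hq; exact hpL
    have hksL' : ∀ q ∈ ks', q ∈ L := fun q hq => hksL q (List.mem_cons_of_mem _ hq)
    have hpw' : ((procd ++ [p]) ++ ks').Pairwise lexlt := by
      rw [List.append_assoc]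
      simpa using hpw
    have hcover' : ∀ p' ∈ ks', ∀ q ∈ L, Pdom q p' → q ∈ procd ++ [p] ∨ q ∈ ks' := by
      intro p' hp' q hqL hdom
      rcases hcover p' (List.mem_cons_of_mem _ hp') q hqL hdom with hq | hq
      · exact Or.inl (List.mem_append.mpr (Or.inl hq))
      · rcases List.mem_cons.mp hq with rfl | hq
        · exact Or.inl (List.mem_append.mpr (Or.inr (by simp)))
        · exact Or.inr hq
    -- case on the branch taken by the scan
    have hpicked_iff : (∃ b, best = some b ∧ p.2 ≤ b) ↔ domB L p = true := by
      rw [hdomchar]; exact (hbest p.2).symm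
    rcases hb : best with _ | b
    · -- best_y is None: p is picked, and p is not dominated
      have hnd : ¬ domB L p = true := by
        rw [← hpicked_iff]
        rintro ⟨b', hb', _⟩
        rw [hb] at hb'
        simp at hb'
      have hbest' : ∀ y : Int, (∃ q ∈ procd ++ [p], y ≤ q.2) ↔ ∃ b', (some p.2 : Option Int) = some b' ∧ y ≤ b' := by
        intro y
        constructor
        · rintro ⟨q, hq, hy⟩
          rcases List.mem_append.mp hq with hq | hq
          · obtain ⟨b', hb', _⟩ := (hbest y).mp ⟨q, hq, hy⟩
            rw [hb] at hb'
            simp at hb'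
          · simp at hq; exact ⟨p.2, rfl, by rw [hq] at hy; exact hy⟩
        · rintro ⟨b', hb', hy⟩
          injection hb' with hb'
          subst hb'
          exact ⟨p, List.mem_append.mpr (Or.inr (by simp)), hy⟩
      rw [pvBscan]
      rw [ih (procd ++ [p]) (some p.2) (PySem.Set.add nd p) hprocdL' hksL' hpw' hbest' hcover' x]
      rw [PySem.Set.mem_add]
      constructor
      · rintro ((hx | rfl) | ⟨hx, hnd'⟩)
        · exact Or.inl hx
        · exact Or.inr ⟨List.mem_cons_self, hnd⟩
        · exact Or.inr ⟨List.mem_cons_of_mem _ hx, hnd'⟩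
      · rintro (hx | ⟨hx, hnd'⟩)
        · exact Or.inl (Or.inl hx)
        · rcases List.mem_cons.mp hx with rfl | hx
          · exact Or.inl (Or.inr rfl)
          · exact Or.inr ⟨hx, hnd'⟩
    · rw [pvBscan]
      by_cases hlt : b < p.2
      · -- picked: every processed y is at most b < p.2, so p is not dominated
        have hnd : ¬ domB L p = true := by
          rw [← hpicked_iff]
          rintro ⟨b', hb', hy⟩
          rw [hb] at hb'
          injection hb' with hb'
          omega
        have hbest' : ∀ y : Int, (∃ q ∈ procd ++ [p], y ≤ q.2) ↔ ∃ b', (some p.2 : Option Int) = some b' ∧ y ≤ b' := by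
          intro y
          constructor
          · rintro ⟨q, hq, hy⟩
            rcases List.mem_append.mp hq with hq | hq
            · obtain ⟨b', hb', hy'⟩ := (hbest y).mp ⟨q, hq, hy⟩
              rw [hb] at hb'
              injection hb' with hb'
              exact ⟨p.2, rfl, by omega⟩
            · simp at hq; exact ⟨p.2, rfl, by rw [hq] at hy; exact hy⟩
          · rintro ⟨b', hb', hy⟩
            injection hb' with hb'
            subst hb'
            exact ⟨p, List.mem_append.mpr (Or.inr (by simp)), hy⟩
        rw [if_pos hlt]
        rw [ih (procd ++ [p]) (some p.2) (PySem.Set.add nd p) hprocdL' hksL' hpw' hbest' hcover' x]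
        rw [PySem.Set.mem_add]
        constructor
        · rintro ((hx | rfl) | ⟨hx, hnd'⟩)
          · exact Or.inl hx
          · exact Or.inr ⟨List.mem_cons_self, hnd⟩
          · exact Or.inr ⟨List.mem_cons_of_mem _ hx, hnd'⟩
        · rintro (hx | ⟨hx, hnd'⟩)
          · exact Or.inl (Or.inl hx)
          · rcases List.mem_cons.mp hx with rfl | hx
            · exact Or.inl (Or.inr rfl)
            · exact Or.inr ⟨hx, hnd'⟩
      · -- skipped: p is dominated (some processed y reaches p.2)
        have hd : domB L p = true := by
          rw [← hpicked_iff]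
          exact ⟨b, hb, by omega⟩
        have hbest' : ∀ y : Int, (∃ q ∈ procd ++ [p], y ≤ q.2) ↔ ∃ b', (some b : Option Int) = some b' ∧ y ≤ b' := by
          intro y
          constructor
          · rintro ⟨q, hq, hy⟩
            rcases List.mem_append.mp hq with hq | hq
            · rw [← hb]; exact (hbest y).mp ⟨q, hq, hy⟩
            · simp at hq; exact ⟨b, rfl, by rw [hq] at hy; omega⟩
          · rintro ⟨b', hb', hy⟩
            injection hb' with hb'
            subst hb'
            obtain ⟨q, hq, hy'⟩ := (hbest y).mpr ⟨b, hb, hy⟩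
            exact ⟨q, List.mem_append.mpr (Or.inl hq), hy'⟩
        rw [if_neg hlt]
        rw [ih (procd ++ [p]) (some b) nd hprocdL' hksL' hpw' hbest' hcover' x]
        constructor
        · rintro (hx | ⟨hx, hnd'⟩)
          · exact Or.inl hx
          · exact Or.inr ⟨List.mem_cons_of_mem _ hx, hnd'⟩
        · rintro (hx | ⟨hx, hnd'⟩)
          · exact Or.inl hx
          · rcases List.mem_cons.mp hx with rfl | hx
            · exact absurd hd hnd'
            · exact Or.inr ⟨hx, hnd'⟩

-- one round of B: membership in the scanned set is non-domination
theorem pvBround (L : List (Int × Int)) (x : Int × Int) (hx : x ∈ L) :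
    PySem.Set.contains
      (pvBscan (PySem.List.sorted2 (PySem.Set.ofList L) (fun q => q.1) (fun q => -q.2))
        none PySem.Set.empty) x = !domB L x := by
  have hmem := pvBscan_mem L
    (PySem.List.sorted2 (PySem.Set.ofList L) (fun q => q.1) (fun q => -q.2)) [] none
    PySem.Set.empty (by intro q hq; simp at hq)
    (fun p hp => (mem_keys L p).mp hp)
    (by simpa using keys_pairwise L)
    (by intro y; constructor
        · rintro ⟨q, hq, _⟩; simp at hq
        · rintro ⟨b, hb, _⟩; simp at hb)
    (fun p _ q hqL _ => Or.inr ((mem_keys L q).mpr hqL))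
    x
  rw [Bool.eq_iff_iff, PySem.Set.contains_iff, hmem]
  constructor
  · rintro (hx' | ⟨_, hnd⟩)
    · exact absurd hx' (by simp [PySem.Set.empty])
    · simpa using hnd
  · intro hnd
    exact Or.inr ⟨(mem_keys L x).mpr hx, by simpa using hnd⟩

theorem pvBloop_eq_ref (fuel : Nat) : ∀ (L : List (Int × Int)) (fronts : List (List (Int × Int))),
    L.length < fuel → pvBloop fuel L fronts = fronts ++ ref L := by
  induction fuel with
  | zero => intro L fronts h; omega
  | succ fuel ih =>
    intro L fronts h
    rcases eq_or_ne L [] with rfl | hL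
    · rw [pvBloop, ref]; simp
    · have hne : L.isEmpty = false := by simpa using hL
      rw [pvBloop, hne]
      dsimp only
      have hf1 : L.filter (fun p => PySem.Set.contains
          (pvBscan (PySem.List.sorted2 (PySem.Set.ofList L) (fun q => q.1) (fun q => -q.2))
            none PySem.Set.empty) p) = L.filter (fun p => !domB L p) :=
        List.filter_congr (fun p hp => pvBround L p hp)
      have hf2 : L.filter (fun p => !PySem.Set.contains
          (pvBscan (PySem.List.sorted2 (PySem.Set.ofList L) (fun q => q.1) (fun q => -q.2))
            none PySem.Set.empty) p) = L.filter (fun p => domB L p) :=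
        List.filter_congr (fun p hp => by rw [pvBround L p hp, Bool.not_not])
      rw [hf1, hf2]
      rw [ih (L.filter (fun p => domB L p)) (fronts ++ [L.filter (fun p => !domB L p)])
        (by have := filter_dom_lt L hL; omega)]
      conv_rhs => rw [ref]
      rw [dif_neg hL]
      simp

-- ===== VERDICT (by name: the statement is the Claim_ definition above) =====
theorem naive_pareto_front_spec : Claim_equal_naive_pareto_front := by
  intro L _
  unfold Spec_naive_pareto_front naive_pareto_front naive_pareto_front_alt
  rw [pvAloop_eq_ref _ _ _ (Nat.lt_succ_self _), pvBloop_eq_ref _ _ _ (Nat.lt_succ_self _)]
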